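-- pv_equiv track=rewrite | github.com/bica-tools/reticulate | reticulate/birkhoff.py | _quotient_ji_poset
-- ===== SOURCE A (Python) =====
-- def _quotient_ji_poset(
--     jis: set[int],
--     fwd_reach: dict[int, set[int]],
-- ) -> dict[int, set[int]]:
--     """Build the Hasse diagram of the join-irreducible poset (restricted order)."""
--     ji_list = sorted(jis)
--
--     # Full order restricted to J(L)
--     ji_reach: dict[int, set[int]] = {}
--     for j in ji_list:
--         ji_reach[j] = {k for k in jis if k in fwd_reach[j] and k != j}
--
--     # Remove transitive edges
--     hasse: dict[int, set[int]] = {j: set() for j in ji_list}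
--     for j in ji_list:
--         below = ji_reach[j]
--         for k in below:
--             is_cover = True
--             for m in below:
--                 if m != k and k in fwd_reach.get(m, set()):
--                     is_cover = False
--                     break
--             if is_cover:
--                 hasse[j].add(k)
--     return hasse
-- ===== SOURCE B (Python) =====
-- def _quotient_ji_poset(
--     jis: set[int],
--     fwd_reach: dict[int, set[int]],
-- ) -> dict[int, set[int]]:
--     """Hasse diagram of the join-irreducible poset: compute, for each j, the set of
--     dominated (non-cover) elements in one pass of set unions, then subtract."""
--     ji_list = sorted(jis)
--
--     # Full order restricted to J(L) (same construction as the original)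
--     ji_reach: dict[int, set[int]] = {}
--     for j in ji_list:
--         ji_reach[j] = {k for k in jis if k in fwd_reach[j] and k != j}
--
--     # Covers = below minus everything reachable from some other element of below
--     hasse: dict[int, set[int]] = {}
--     for j in ji_list:
--         below = ji_reach[j]
--         dominated: set[int] = set()
--         for m in below:
--             dominated |= (fwd_reach.get(m, set()) & below) - {m}
--         hasse[j] = below - dominated
--     return hasse
-- ===== Notes on version B (the rewrite author's own statement) =====
-- stated objective: alternative
-- what changed: A decides each k by an inner 'is_cover' scan over below with an early break inside a per-k loop; B instead makes one pass over below accumulating the union of dominated elements ((fwd_reach.get(m, set()) & below) - {m}) and obtains each hasse[j] by a single set subtraction below - dominated.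
import Mathlib
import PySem

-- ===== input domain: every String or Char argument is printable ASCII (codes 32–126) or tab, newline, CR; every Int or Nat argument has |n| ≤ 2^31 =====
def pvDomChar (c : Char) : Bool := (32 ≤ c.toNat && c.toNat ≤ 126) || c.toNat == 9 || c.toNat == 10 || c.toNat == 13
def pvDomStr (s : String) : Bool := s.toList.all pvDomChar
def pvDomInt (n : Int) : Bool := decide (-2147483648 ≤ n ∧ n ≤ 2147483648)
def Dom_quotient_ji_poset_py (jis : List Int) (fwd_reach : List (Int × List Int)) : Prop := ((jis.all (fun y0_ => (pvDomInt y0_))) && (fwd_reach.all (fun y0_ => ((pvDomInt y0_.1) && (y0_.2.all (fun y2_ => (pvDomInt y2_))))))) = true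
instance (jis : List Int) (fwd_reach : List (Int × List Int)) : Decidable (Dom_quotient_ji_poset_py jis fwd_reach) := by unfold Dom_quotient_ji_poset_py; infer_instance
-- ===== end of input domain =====

-- B replaces A's nested "is k a cover?" scan (an inner loop with break for every k) by one
-- pass over `below` accumulating the dominated elements as a set union, then one subtraction.

-- ===== PORT A =====
-- inner loop of A: for m in below: if m != k and k in fwd_reach.get(m, set()): is_cover = False; break
def pvIsCoverLoop (fr : PySem.Dict Int (List Int)) (k : Int) : List Int → Bool
  | [] => true
  | m :: rest =>
      if m ≠ k ∧ (fr.getD m []).contains k then false else pvIsCoverLoop fr k rest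

-- ji_reach[j] = {k for k in jis if k in fwd_reach[j] and k != j}
-- (fwd_reach[j] ported with getD: the KeyError case is excluded by Pre_)
def pvJiReach (jis : List Int) (fr : PySem.Dict Int (List Int)) (ji_list : List Int) :
    PySem.Dict Int (List Int) :=
  ji_list.foldl
    (fun d j =>
      d.insert j (PySem.Set.ofList (jis.filter (fun k => (fr.getD j []).contains k && k ≠ j))))
    PySem.Dict.empty

-- body of A's outer hasse loop: for k in below: … if is_cover: hasse[j].add(k)
def pvFillStep (fr ji_reach : PySem.Dict Int (List Int))
    (d : PySem.Dict Int (List Int)) (j : Int) : PySem.Dict Int (List Int) :=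
  let below := ji_reach.getD j []
  below.foldl
    (fun d k =>
      if pvIsCoverLoop fr k below then d.modify j [] (fun s => PySem.Set.add s k) else d)
    d

def quotient_ji_poset_py (jis : List Int) (fwd_reach : List (Int × List Int)) :
    List (Int × List Int) :=
  let fr := PySem.Dict.mk fwd_reach
  let ji_list := PySem.List.sorted jis (fun x => x) false
  let ji_reach := pvJiReach jis fr ji_list
  let hasse0 : PySem.Dict Int (List Int) :=
    ji_list.foldl (fun d j => d.insert j PySem.Set.empty) PySem.Dict.empty
  (ji_list.foldl (pvFillStep fr ji_reach) hasse0).items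

-- ===== PORT B =====
-- body of B's loop: one pass accumulating dominated, then hasse[j] = below - dominated
def pvCoverStep (fr ji_reach : PySem.Dict Int (List Int))
    (d : PySem.Dict Int (List Int)) (j : Int) : PySem.Dict Int (List Int) :=
  let below := ji_reach.getD j []
  let dominated :=
    below.foldl
      (fun dom m =>
        PySem.Set.union dom
          (PySem.Set.discard (PySem.Set.inter (PySem.Set.ofList (fr.getD m [])) below) m))
      PySem.Set.empty
  d.insert j (PySem.Set.diff below dominated)

def quotient_ji_poset_py_alt (jis : List Int) (fwd_reach : List (Int × List Int)) :
    List (Int × List Int) :=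
  let fr := PySem.Dict.mk fwd_reach
  let ji_list := PySem.List.sorted jis (fun x => x) false
  let ji_reach := pvJiReach jis fr ji_list
  (ji_list.foldl (pvCoverStep fr ji_reach) PySem.Dict.empty).items

-- ===== PRECONDITION & SPEC =====
-- jis is a Python set (its elements are distinct) and A evaluates fwd_reach[j] for every
-- j in jis (KeyError otherwise): Pre_ states exactly these two shape conditions.
def Pre_quotient_ji_poset_py (jis : List Int) (fwd_reach : List (Int × List Int)) : Prop :=
  jis.Nodup ∧ ∀ j ∈ jis, (PySem.Dict.mk fwd_reach).contains j = true
instance (jis : List Int) (fwd_reach : List (Int × List Int)) :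
    Decidable (Pre_quotient_ji_poset_py jis fwd_reach) := by
  unfold Pre_quotient_ji_poset_py; infer_instance

def pvWitness_quotient_ji_poset_py : List Int × (List (Int × List Int)) :=
  ([1, 2, 3], [(1, [2, 3]), (2, [3]), (3, [])])

def Spec_quotient_ji_poset_py (jis : List Int) (fwd_reach : List (Int × List Int)) (out : List (Int × List Int)) : Prop := out = quotient_ji_poset_py_alt jis fwd_reach
instance (jis : List Int) (fwd_reach : List (Int × List Int)) (out : List (Int × List Int)) : Decidable (Spec_quotient_ji_poset_py jis fwd_reach out) := by unfold Spec_quotient_ji_poset_py; infer_instance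

-- ===== CLAIM (what is proved, stated in full; the proofs are below) =====
def Claim_equal_quotient_ji_poset_py : Prop := ∀ (jis : List Int) (fwd_reach : List (Int × List Int)), Dom_quotient_ji_poset_py jis fwd_reach → Pre_quotient_ji_poset_py jis fwd_reach → Spec_quotient_ji_poset_py jis fwd_reach (quotient_ji_poset_py jis fwd_reach)

-- ===== LEMMAS AND PROOFS =====

-- A's inner loop is the universal "no m strictly dominates k" test
theorem pv_cover_char (fr : PySem.Dict Int (List Int)) (k : Int) (bl : List Int) :
    pvIsCoverLoop fr k bl = true ↔ ∀ m ∈ bl, ¬(m ≠ k ∧ k ∈ fr.getD m []) := by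
  induction bl with
  | nil => simp [pvIsCoverLoop]
  | cons m rest ih =>
      simp only [pvIsCoverLoop, List.mem_cons]
      split_ifs with h
      · simp only [false_iff]
        intro hall
        exact absurd ⟨h.1, List.contains_iff_mem.mp h.2⟩ (hall m (Or.inl rfl))
      · rw [ih]
        constructor
        · intro hall m' hm'
          rcases hm' with rfl | hm'
          · exact fun hc => h ⟨hc.1, List.contains_iff_mem.mpr hc.2⟩
          · exact hall m' hm'
        · exact fun hall m' hm' => hall m' (Or.inr hm')

-- membership in B's dominated accumulator
theorem pv_mem_dom (fr : PySem.Dict Int (List Int)) (below : List Int) (l : List Int)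
    (s : PySem.Set Int) (y : Int) :
    y ∈ l.foldl
        (fun dom m =>
          PySem.Set.union dom
            (PySem.Set.discard (PySem.Set.inter (PySem.Set.ofList (fr.getD m [])) below) m)) s
      ↔ y ∈ s ∨ ∃ m ∈ l, y ∈ fr.getD m [] ∧ y ∈ below ∧ y ≠ m := by
  induction l generalizing s with
  | nil => simp
  | cons m rest ih =>
      simp only [List.foldl_cons, ih, PySem.Set.mem_union, PySem.Set.mem_discard,
        PySem.Set.mem_inter, PySem.Set.mem_ofList, List.mem_cons]
      constructor
      · rintro (((h | ⟨⟨hr, hb⟩, hn⟩) | ⟨m', hm', h⟩))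
        · exact Or.inl h
        · exact Or.inr ⟨m, Or.inl rfl, hr, hb, hn⟩
        · exact Or.inr ⟨m', Or.inr hm', h⟩
      · rintro (h | ⟨m', (rfl | hm'), hr, hb, hn⟩)
        · exact Or.inl (Or.inl h)
        · exact Or.inl (Or.inr ⟨⟨hr, hb⟩, hn⟩)
        · exact Or.inr ⟨m', hm', hr, hb, hn⟩

-- for k ∈ below, A's cover test is the complement of membership in B's dominated set
theorem pv_cover_eq_not_dom (fr : PySem.Dict Int (List Int)) (below : List Int) (k : Int)
    (hk : k ∈ below) :
    pvIsCoverLoop fr k below =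
      !(PySem.Set.contains
          (below.foldl
            (fun dom m =>
              PySem.Set.union dom
                (PySem.Set.discard (PySem.Set.inter (PySem.Set.ofList (fr.getD m [])) below) m))
            PySem.Set.empty) k) := by
  rw [Bool.eq_iff_iff]
  simp only [Bool.not_eq_true', ← Bool.not_eq_true, PySem.Set.contains_iff]
  rw [pv_cover_char]
  constructor
  · intro h hmem
    rcases (pv_mem_dom fr below below PySem.Set.empty k).mp hmem with h0 | ⟨m, hm, hr, _, hn⟩
    · simp [PySem.Set.empty] at h0
    · exact h m hm ⟨hn.symm, hr⟩
  · rintro h m hm ⟨hne, hr⟩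
    exact h ((pv_mem_dom fr below below PySem.Set.empty k).mpr
      (Or.inr ⟨m, hm, hr, hk, hne.symm⟩))

-- folding conditional Set.add over a Nodup list disjoint from the accumulator is a filter
theorem pv_foldl_add_filter (p : Int → Bool) (l : List Int) :
    ∀ s : List Int, l.Nodup → (∀ k ∈ l, k ∉ s) →
      l.foldl (fun s k => if p k then PySem.Set.add s k else s) s = s ++ l.filter p := by
  induction l with
  | nil => simp
  | cons a l ih =>
      intro s hnd hdisj
      have ha : a ∉ s := hdisj a (by simp)
      simp only [List.foldl_cons]
      by_cases hp : p a
      · rw [if_pos hp, PySem.Set.add_of_not_mem ha, ih (s ++ [a]) hnd.of_cons]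
        · simp [hp]
        · intro k hk
          simp only [List.mem_append, List.mem_singleton]
          rintro (hks | rfl)
          · exact hdisj k (by simp [hk]) hks
          · exact (List.nodup_cons.mp hnd).1 hk
      · rw [if_neg hp, ih s hnd.of_cons (fun k hk => hdisj k (by simp [hk]))]
        simp [hp]

-- getD through a fold of key-determined inserts
theorem pv_getD_foldl_insert_not_mem (f : Int → List Int) (l : List Int) :
    ∀ (d : PySem.Dict Int (List Int)) (j : Int), j ∉ l →
      (l.foldl (fun d j => d.insert j (f j)) d).getD j [] = d.getD j [] := by
  induction l with
  | nil => simp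
  | cons a l ih =>
      intro d j hj
      simp only [List.mem_cons, not_or] at hj
      simp only [List.foldl_cons]
      rw [ih _ j hj.2, PySem.Dict.getD_insert_of_ne _ _ _ hj.1]

theorem pv_getD_foldl_insert_mem (f : Int → List Int) (l : List Int) :
    ∀ (d : PySem.Dict Int (List Int)) (j : Int), l.Nodup → j ∈ l →
      (l.foldl (fun d j => d.insert j (f j)) d).getD j [] = f j := by
  induction l with
  | nil => simp
  | cons a l ih =>
      intro d j hnd hj
      simp only [List.foldl_cons]
      rcases List.mem_cons.mp hj with rfl | hj'
      · rw [pv_getD_foldl_insert_not_mem f l _ j (List.nodup_cons.mp hnd).1,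
          PySem.Dict.getD_insert_self]
      · exact ih _ j hnd.of_cons hj'

-- the value A's inner loop accumulates at key j
def pvInner (fr : PySem.Dict Int (List Int)) (below : List Int) (s0 : List Int) : List Int :=
  below.foldl (fun s k => if pvIsCoverLoop fr k below then PySem.Set.add s k else s) s0

-- a fold of conditional modifies at the fixed key j acts on that key's value only
theorem pv_getD_modfold (p : Int → Bool) (j j' : Int) (bl : List Int) :
    ∀ d : PySem.Dict Int (List Int),
      (bl.foldl (fun d k => if p k then d.modify j [] (fun s => PySem.Set.add s k) else d)
          d).getD j' [] =
        if j' = j then bl.foldl (fun s k => if p k then PySem.Set.add s k else s) (d.getD j [])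
        else d.getD j' [] := by
  induction bl with
  | nil =>
      intro d
      split_ifs with h
      · rw [h]; rfl
      · rfl
  | cons k bl ih =>
      intro d
      simp only [List.foldl_cons]
      by_cases hp : p k
      · rw [if_pos hp, if_pos hp, ih]
        split_ifs with h
        · rw [PySem.Dict.getD_modify_self]
        · rw [PySem.Dict.getD_modify_of_ne _ _ _ h]
      · rw [if_neg hp, if_neg hp, ih]

theorem pv_keys_modfold (p : Int → Bool) (j : Int) (bl : List Int) :
    ∀ d : PySem.Dict Int (List Int), d.contains j = true →
      (bl.foldl (fun d k => if p k then d.modify j [] (fun s => PySem.Set.add s k) else d)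
          d).keys = d.keys := by
  induction bl with
  | nil => intro d _; rfl
  | cons k bl ih =>
      intro d hc
      simp only [List.foldl_cons]
      by_cases hp : p k
      · rw [if_pos hp, ih _ (by rw [PySem.Dict.contains_modify]; simp),
          PySem.Dict.keys_modify, PySem.Dict.keys_insert_of_contains _ _ hc]
      · rw [if_neg hp, ih _ hc]

-- pvFillStep touches only key j
theorem pv_getD_fillStep (fr r : PySem.Dict Int (List Int)) (d : PySem.Dict Int (List Int))
    (j j' : Int) :
    (pvFillStep fr r d j).getD j' [] =
      if j' = j then pvInner fr (r.getD j []) (d.getD j []) else d.getD j' [] := by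
  unfold pvFillStep pvInner
  exact pv_getD_modfold (fun k => pvIsCoverLoop fr k (r.getD j [])) j j' (r.getD j []) d

theorem pv_keys_fillStep (fr r : PySem.Dict Int (List Int)) (d : PySem.Dict Int (List Int))
    (j : Int) (hj : d.contains j = true) : (pvFillStep fr r d j).keys = d.keys := by
  unfold pvFillStep
  exact pv_keys_modfold (fun k => pvIsCoverLoop fr k (r.getD j [])) j (r.getD j []) d hj

theorem pv_keys_fill (fr r : PySem.Dict Int (List Int)) (l : List Int) :
    ∀ d : PySem.Dict Int (List Int), (∀ i ∈ l, d.contains i = true) →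
      (l.foldl (pvFillStep fr r) d).keys = d.keys := by
  induction l with
  | nil => intro d _; rfl
  | cons a l ih =>
      intro d hc
      have hk : (pvFillStep fr r d a).keys = d.keys :=
        pv_keys_fillStep fr r d a (hc a (by simp))
      simp only [List.foldl_cons]
      rw [ih _ (fun i hi => by
        rw [PySem.Dict.contains_iff_mem_keys, hk, ← PySem.Dict.contains_iff_mem_keys]
        exact hc i (by simp [hi])), hk]

theorem pv_getD_fill (fr r : PySem.Dict Int (List Int)) (l : List Int) :
    ∀ (d : PySem.Dict Int (List Int)) (j : Int), l.Nodup → (∀ i ∈ l, d.contains i = true) →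
      (l.foldl (pvFillStep fr r) d).getD j [] =
        if j ∈ l then pvInner fr (r.getD j []) (d.getD j []) else d.getD j [] := by
  induction l with
  | nil => intro d j _ _; simp
  | cons a l ih =>
      intro d j hnd hc
      have hk : (pvFillStep fr r d a).keys = d.keys :=
        pv_keys_fillStep fr r d a (hc a (by simp))
      have hc' : ∀ i ∈ l, (pvFillStep fr r d a).contains i = true := fun i hi => by
        rw [PySem.Dict.contains_iff_mem_keys, hk, ← PySem.Dict.contains_iff_mem_keys]
        exact hc i (by simp [hi])
      simp only [List.foldl_cons]
      rw [ih _ j hnd.of_cons hc']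
      by_cases hja : j = a
      · subst hja
        have hjl : j ∉ l := (List.nodup_cons.mp hnd).1
        rw [if_neg hjl, if_pos (by simp), pv_getD_fillStep]
        rw [if_pos rfl]
      · rw [pv_getD_fillStep, if_neg hja]
        by_cases hjl : j ∈ l
        · rw [if_pos hjl, if_pos (by simp [hjl])]
        · rw [if_neg hjl, if_neg (by simp [hja, hjl])]

-- B's per-j value, as items_foldl_insert_fresh wants to see it
theorem pv_coverStep_eq (fr r : PySem.Dict Int (List Int)) :
    pvCoverStep fr r = fun d j =>
      d.insert j
        (PySem.Set.diff (r.getD j [])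
          ((r.getD j []).foldl
            (fun dom m =>
              PySem.Set.union dom
                (PySem.Set.discard
                  (PySem.Set.inter (PySem.Set.ofList (fr.getD m [])) (r.getD j [])) m))
            PySem.Set.empty)) := rfl

-- the per-key agreement: A's conditional adds produce exactly B's set difference
theorem pv_value_eq (fr : PySem.Dict Int (List Int)) (below : List Int) (hnd : below.Nodup) :
    pvInner fr below [] =
      PySem.Set.diff below
        ((below.foldl
          (fun dom m =>
            PySem.Set.union dom
              (PySem.Set.discard (PySem.Set.inter (PySem.Set.ofList (fr.getD m [])) below) m))
          PySem.Set.empty)) := by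
  unfold pvInner
  rw [pv_foldl_add_filter (fun k => pvIsCoverLoop fr k below) below [] hnd (by simp)]
  show below.filter _ = below.filter _
  exact List.filter_congr fun k hk => pv_cover_eq_not_dom fr below k hk

-- ===== VERDICT (by name: the statement is the Claim_ definition above) =====
theorem quotient_ji_poset_py_spec : Claim_equal_quotient_ji_poset_py := by
  intro jis fwd_reach _ hpre
  obtain ⟨hnodup, _⟩ := hpre
  unfold Spec_quotient_ji_poset_py quotient_ji_poset_py quotient_ji_poset_py_alt
  show (PySem.Dict.items
      ((PySem.List.sorted jis (fun x => x) false).foldl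
        (pvFillStep (PySem.Dict.mk fwd_reach)
          (pvJiReach jis (PySem.Dict.mk fwd_reach) (PySem.List.sorted jis (fun x => x) false)))
        ((PySem.List.sorted jis (fun x => x) false).foldl
          (fun d j => d.insert j PySem.Set.empty) PySem.Dict.empty))) =
    (PySem.Dict.items
      ((PySem.List.sorted jis (fun x => x) false).foldl
        (pvCoverStep (PySem.Dict.mk fwd_reach)
          (pvJiReach jis (PySem.Dict.mk fwd_reach) (PySem.List.sorted jis (fun x => x) false)))
        PySem.Dict.empty))
  generalize hfr : PySem.Dict.mk fwd_reach = fr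
  generalize hls : PySem.List.sorted jis (fun x => x) false = l
  have hlnd : l.Nodup := by
    rw [← hls]
    exact ((PySem.List.sorted_perm jis (fun x => x) false).nodup_iff).mpr hnodup
  generalize hrr : pvJiReach jis fr l = r
  -- ji_reach.getD j [] for j ∈ l
  have hbelow : ∀ j ∈ l, r.getD j [] =
      PySem.Set.ofList (jis.filter (fun k => (fr.getD j []).contains k && k ≠ j)) := by
    intro j hj
    rw [← hrr]
    unfold pvJiReach
    exact pv_getD_foldl_insert_mem _ l PySem.Dict.empty j hlnd hj
  -- A's initial hasse dict
  have h0items : ((l.foldl (fun (d : PySem.Dict Int (List Int)) j => d.insert j PySem.Set.empty) PySem.Dict.empty).items) =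
      l.map (fun j => (j, ([] : List Int))) := by
    have := PySem.Dict.items_foldl_insert_fresh l (fun a => a)
      (fun _ => (PySem.Set.empty : List Int)) PySem.Dict.empty
      (fun a _ => PySem.Dict.contains_empty a) (by simpa using hlnd)
    simpa [PySem.Set.empty] using this
  have h0keys : ((l.foldl (fun (d : PySem.Dict Int (List Int)) j => d.insert j PySem.Set.empty) PySem.Dict.empty).keys) = l := by
    show List.map (fun p => p.1)
      ((l.foldl (fun (d : PySem.Dict Int (List Int)) j => d.insert j PySem.Set.empty)
        PySem.Dict.empty).items) = l
    rw [h0items, List.map_map]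
    exact List.map_id l
  have h0contains : ∀ i ∈ l,
      ((l.foldl (fun (d : PySem.Dict Int (List Int)) j => d.insert j PySem.Set.empty) PySem.Dict.empty).contains i) = true := by
    intro i hi
    rw [PySem.Dict.contains_iff_mem_keys, h0keys]
    exact hi
  have h0getD : ∀ j ∈ l,
      ((l.foldl (fun (d : PySem.Dict Int (List Int)) j => d.insert j PySem.Set.empty) PySem.Dict.empty).getD j []) = [] := by
    intro j hj
    exact pv_getD_foldl_insert_mem (fun _ => (PySem.Set.empty : List Int)) l _ j hlnd hj
  -- A's final dict
  have hAkeys : ((l.foldl (pvFillStep fr r)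
      (l.foldl (fun (d : PySem.Dict Int (List Int)) j => d.insert j PySem.Set.empty) PySem.Dict.empty)).keys) = l := by
    rw [pv_keys_fill fr r l _ h0contains, h0keys]
  have hAgetD : ∀ j ∈ l, ((l.foldl (pvFillStep fr r)
      (l.foldl (fun (d : PySem.Dict Int (List Int)) j => d.insert j PySem.Set.empty) PySem.Dict.empty)).getD j []) =
      pvInner fr (r.getD j []) [] := by
    intro j hj
    rw [pv_getD_fill fr r l _ j hlnd h0contains, if_pos hj, h0getD j hj]
  -- B's final dict
  have hBitems : ((l.foldl (pvCoverStep fr r) PySem.Dict.empty).items) =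
      l.map (fun j => (j,
        PySem.Set.diff (r.getD j [])
          ((r.getD j []).foldl
            (fun dom m =>
              PySem.Set.union dom
                (PySem.Set.discard
                  (PySem.Set.inter (PySem.Set.ofList (fr.getD m [])) (r.getD j [])) m))
            PySem.Set.empty))) := by
    rw [pv_coverStep_eq]
    have := PySem.Dict.items_foldl_insert_fresh l (fun a => a)
      (fun j => PySem.Set.diff (r.getD j [])
        ((r.getD j []).foldl
          (fun dom m =>
            PySem.Set.union dom
              (PySem.Set.discard
                (PySem.Set.inter (PySem.Set.ofList (fr.getD m [])) (r.getD j [])) m))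
          PySem.Set.empty)) PySem.Dict.empty
      (fun a _ => PySem.Dict.contains_empty a) (by simpa using hlnd)
    simpa using this
  -- assemble
  rw [PySem.Dict.items_eq_map_keys _ (by rw [hAkeys]; exact hlnd) [], hAkeys, hBitems]
  refine List.map_congr_left fun j hj => ?_
  rw [hAgetD j hj]
  have hbnd : (r.getD j []).Nodup := by
    rw [hbelow j hj]
    exact PySem.Set.nodup_ofList _
  rw [pv_value_eq fr (r.getD j []) hbnd]
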